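-- pv_equiv track=rewrite | github.com/pypi-data/pypi-mirror-20 | packages/pyrogi/pyrogi-0.1.2.tar.gz/pyrogi-0.1.2/pyrogi/__init__.py | parse_text_into_characters
-- ===== SOURCE A (Python) =====
-- def parse_text_into_characters(text):
--     characters = []
--     is_escaping = False
--     group = None
--     def append(ch):
--         """append the next character to the right place"""
--         if group is None:
--             characters.append(ch)
--         else:
--             group.append(ch)
--
--     for ch in text:
--         if ch == '\\':
--             if is_escaping:
--                 append(ch)
--                 is_escaping = False
--             else:
--                 is_escaping = True
--         elif ch == '[':
--             if is_escaping:
--                 append(ch)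
--                 is_escaping = False
--             else:
--                 if group is not None:
--                     raise ValueError('You cannot start a character group within another group.')
--                 group = []
--             is_escaping = False
--         elif ch == ']':
--             if is_escaping:
--                 append(ch)
--             else:
--                 if group is None:
--                     raise ValueError('You cannot end a character group that you have not started.')
--                 if len(group) == 0:
--                     raise ValueError('You cannot have an empty character group.')
--                 characters.append(''.join(group))
--                 group = None
--             is_escaping = False
--         else:
--             if is_escaping:
--                 raise ValueError("Invalid escape character '" + ch + "'.")
--             append(ch)
--             is_escaping = False
--     if is_escaping:
--         raise ValueError("The '\\' at the end of the string isn't escaping anything.")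
--     if group is not None:
--         raise ValueError('You started a character group but did not finish it.')
--     return characters
-- ===== SOURCE B (Python) =====
-- def parse_text_into_characters(text):
--     characters = []
--     i = 0
--     n = len(text)
--     while i < n:
--         ch = text[i]
--         if ch == '\\':
--             if i + 1 >= n:
--                 raise ValueError("The '\\' at the end of the string isn't escaping anything.")
--             nxt = text[i + 1]
--             if nxt in '\\[]':
--                 characters.append(nxt)
--                 i += 2
--             else:
--                 raise ValueError("Invalid escape character '" + nxt + "'.")
--         elif ch == ']':
--             raise ValueError('You cannot end a character group that you have not started.')
--         elif ch == '[':
--             i += 1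
--             buf = []
--             while True:
--                 if i >= n:
--                     raise ValueError('You started a character group but did not finish it.')
--                 c = text[i]
--                 if c == '\\':
--                     if i + 1 >= n:
--                         raise ValueError("The '\\' at the end of the string isn't escaping anything.")
--                     nx = text[i + 1]
--                     if nx in '\\[]':
--                         buf.append(nx)
--                         i += 2
--                     else:
--                         raise ValueError("Invalid escape character '" + nx + "'.")
--                 elif c == ']':
--                     if not buf:
--                         raise ValueError('You cannot have an empty character group.')
--                     characters.append(''.join(buf))
--                     i += 1
--                     break
--                 elif c == '[':
--                     raise ValueError('You cannot start a character group within another group.')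
--                 else:
--                     buf.append(c)
--                     i += 1
--         else:
--             characters.append(ch)
--             i += 1
--     return characters
-- ===== Notes on version B (the rewrite author's own statement) =====
-- stated objective: alternative
-- what changed: Replaced A's flag-based state machine (is_escaping flag, Optional group accumulator, append closure) by an index-based recursive-descent scan that consumes the escaped character together with its backslash and parses a group in a dedicated inner loop.
import Mathlib
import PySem

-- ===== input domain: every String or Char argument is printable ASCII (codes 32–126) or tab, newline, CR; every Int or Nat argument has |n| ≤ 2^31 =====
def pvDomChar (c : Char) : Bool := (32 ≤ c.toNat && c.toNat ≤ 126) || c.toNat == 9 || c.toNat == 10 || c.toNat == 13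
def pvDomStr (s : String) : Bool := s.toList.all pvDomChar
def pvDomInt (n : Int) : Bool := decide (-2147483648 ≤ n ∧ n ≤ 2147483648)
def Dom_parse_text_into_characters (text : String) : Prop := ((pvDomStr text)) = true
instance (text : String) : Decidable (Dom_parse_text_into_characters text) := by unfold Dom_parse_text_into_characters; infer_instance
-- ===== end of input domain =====

-- B replaces A's flag-based state machine by an index-based recursive-descent scan; same cost, return value proved equal wherever A returns.

-- ===== PORT A =====
-- A's `append` closure: appends to the open group if any, else to characters.
def pvAppendA (chars : List String) (grp : Option (List Char)) (c : Char) :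
    List String × Option (List Char) :=
  match grp with
  | none => (chars ++ [String.mk [c]], none)
  | some g => (chars, some (g ++ [c]))

-- A's for-loop over the characters, state (characters, is_escaping, group); none = ValueError.
def pvALoop (l : List Char) (chars : List String) (esc : Bool) (grp : Option (List Char)) :
    Option (List String) :=
  match l with
  | [] =>
    if esc then none
    else match grp with
      | some _ => none
      | none => some chars
  | c :: rest =>
    if c = '\\' then
      if esc then
        let p := pvAppendA chars grp c
        pvALoop rest p.1 false p.2
      else pvALoop rest chars true grp
    else if c = '[' then
      if esc then
        let p := pvAppendA chars grp c
        pvALoop rest p.1 false p.2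
      else match grp with
        | some _ => none
        | none => pvALoop rest chars false (some [])
    else if c = ']' then
      if esc then
        let p := pvAppendA chars grp c
        pvALoop rest p.1 false p.2
      else match grp with
        | none => none
        | some g => if g = [] then none else pvALoop rest (chars ++ [String.mk g]) false none
    else
      if esc then none
      else
        let p := pvAppendA chars grp c
        pvALoop rest p.1 false p.2

def parse_text_into_characters (text : String) : List String :=
  (pvALoop text.toList [] false none).getD []

-- ===== PORT B =====
-- B's `nxt in '\\[]'` test.
def pvEscOK (c : Char) : Bool := c = '\\' || c = '[' || c = ']'

mutual
-- B's outer while loop (position = the unconsumed suffix); none = ValueError.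
def pvBMain : List Char → Option (List String)
  | [] => some []
  | c :: rest =>
    if c = '\\' then
      match rest with
      | [] => none
      | nxt :: rest' =>
        if pvEscOK nxt then (pvBMain rest').map (String.mk [nxt] :: ·) else none
    else if c = ']' then none
    else if c = '[' then pvBGroup rest []
    else (pvBMain rest).map (String.mk [c] :: ·)
termination_by l => l.length

-- B's inner group loop carrying buf.
def pvBGroup : List Char → List Char → Option (List String)
  | [], _ => none
  | c :: rest, buf =>
    if c = '\\' then
      match rest with
      | [] => none
      | nx :: rest' =>
        if pvEscOK nx then pvBGroup rest' (buf ++ [nx]) else none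
    else if c = ']' then
      if buf = [] then none else (pvBMain rest).map (String.mk buf :: ·)
    else if c = '[' then none
    else pvBGroup rest (buf ++ [c])
termination_by l _ => l.length
end

def parse_text_into_characters_alt (text : String) : List String :=
  (pvBMain text.toList).getD []

-- ===== PRECONDITION & SPEC =====
-- Pre_ excludes exactly the inputs on which A raises ValueError (invalid or
-- dangling escapes, unstarted/unfinished/empty/nested character groups).
-- recognizer of well-formed texts: ingroup = inside a '[..]' group, ne = group non-empty so far
def pvWFAux : List Char → Bool → Bool → Bool
  | [], ingroup, _ => !ingroup
  | ['\\'], _, _ => false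
  | '\\' :: c :: rest, ingroup, _ => pvEscOK c && pvWFAux rest ingroup true
  | ']' :: rest, ingroup, ne => ingroup && ne && pvWFAux rest false false
  | '[' :: rest, ingroup, _ => !ingroup && pvWFAux rest true false
  | _ :: rest, ingroup, _ => pvWFAux rest ingroup true

def Pre_parse_text_into_characters (text : String) : Prop := pvWFAux text.toList false false = true
instance (text : String) : Decidable (Pre_parse_text_into_characters text) := by
  unfold Pre_parse_text_into_characters; infer_instance

def pvWitness_parse_text_into_characters : String := "a\\[b[cd]e"

def Spec_parse_text_into_characters (text : String) (out : List String) : Prop := out = parse_text_into_characters_alt text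
instance (text : String) (out : List String) : Decidable (Spec_parse_text_into_characters text out) := by unfold Spec_parse_text_into_characters; infer_instance

-- ===== CLAIM (what is proved, stated in full; the proofs are below) =====
def Claim_equal_parse_text_into_characters : Prop := ∀ (text : String), Dom_parse_text_into_characters text → Pre_parse_text_into_characters text → Spec_parse_text_into_characters text (parse_text_into_characters text)

-- ===== LEMMAS AND PROOFS =====

-- one-step unfolding lemmas for the mutual B-side recursions
theorem pvBMain_nil : pvBMain [] = some [] := by rw [pvBMain.eq_def]
theorem pvBMain_cons (c : Char) (rest : List Char) :
    pvBMain (c :: rest) =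
      (if c = '\\' then
        match rest with
        | [] => none
        | nxt :: rest' =>
          if pvEscOK nxt then (pvBMain rest').map (String.mk [nxt] :: ·) else none
      else if c = ']' then none
      else if c = '[' then pvBGroup rest []
      else (pvBMain rest).map (String.mk [c] :: ·)) := by rw [pvBMain.eq_def]
theorem pvBGroup_nil (buf : List Char) : pvBGroup [] buf = none := by rw [pvBGroup.eq_def]
theorem pvBGroup_cons (c : Char) (rest buf : List Char) :
    pvBGroup (c :: rest) buf =
      (if c = '\\' then
        match rest with
        | [] => none
        | nx :: rest' =>
          if pvEscOK nx then pvBGroup rest' (buf ++ [nx]) else none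
      else if c = ']' then
        if buf = [] then none else (pvBMain rest).map (String.mk buf :: ·)
      else if c = '[' then none
      else pvBGroup rest (buf ++ [c])) := by rw [pvBGroup.eq_def]

-- The two loops agree from corresponding states, on ALL inputs (both model the
-- same ValueErrors by `none`), by strong induction on the remaining suffix.
theorem pvKey : ∀ n l, List.length l ≤ n →
    (∀ chars, pvALoop l chars false none = (pvBMain l).map (chars ++ ·)) ∧
    (∀ chars g, pvALoop l chars false (some g) = (pvBGroup l g).map (chars ++ ·)) := by
  intro n
  induction n with
  | zero =>
    intro l hl
    have h0 : l = [] := List.eq_nil_of_length_eq_zero (Nat.le_zero.mp hl)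
    subst h0
    exact ⟨fun chars => by simp [pvALoop, pvBMain_nil],
           fun chars g => by simp [pvALoop, pvBGroup_nil]⟩
  | succ n ih =>
    intro l hl
    match l with
    | [] =>
      exact ⟨fun chars => by simp [pvALoop, pvBMain_nil],
             fun chars g => by simp [pvALoop, pvBGroup_nil]⟩
    | c :: rest =>
      have hr : rest.length ≤ n := by simpa using Nat.succ_le_succ_iff.mp (by simpa using hl)
      constructor
      · intro chars
        by_cases h1 : c = '\\'
        · subst h1
          match rest with
          | [] => simp [pvALoop, pvBMain_cons]
          | nxt :: rest' =>
            have hr' : rest'.length ≤ n := by simp at hr; omega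
            by_cases e1 : nxt = '\\'
            · subst e1
              rw [show pvALoop ('\\' :: '\\' :: rest') chars false none
                    = pvALoop rest' (chars ++ [String.mk ['\\']]) false none by
                  simp [pvALoop, pvAppendA]]
              rw [(ih rest' hr').1]
              simp [pvBMain_cons, pvEscOK]
              cases pvBMain rest' <;> simp
            · by_cases e2 : nxt = '['
              · subst e2
                rw [show pvALoop ('\\' :: '[' :: rest') chars false none
                      = pvALoop rest' (chars ++ [String.mk ['[']]) false none by
                    simp [pvALoop, pvAppendA]]
                rw [(ih rest' hr').1]
                simp [pvBMain_cons, pvEscOK]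
                cases pvBMain rest' <;> simp
              · by_cases e3 : nxt = ']'
                · subst e3
                  rw [show pvALoop ('\\' :: ']' :: rest') chars false none
                        = pvALoop rest' (chars ++ [String.mk [']']]) false none by
                      simp [pvALoop, pvAppendA]]
                  rw [(ih rest' hr').1]
                  simp [pvBMain_cons, pvEscOK]
                  cases pvBMain rest' <;> simp
                · simp [pvALoop, pvBMain_cons, pvEscOK, e1, e2, e3]
        · by_cases h2 : c = '['
          · subst h2
            rw [show pvALoop ('[' :: rest) chars false none
                  = pvALoop rest chars false (some []) by simp [pvALoop]]
            rw [(ih rest hr).2]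
            simp [pvBMain_cons]
          · by_cases h3 : c = ']'
            · subst h3; simp [pvALoop, pvBMain_cons]
            · rw [show pvALoop (c :: rest) chars false none
                    = pvALoop rest (chars ++ [String.mk [c]]) false none by
                  simp [pvALoop, pvAppendA, h1, h2, h3]]
              rw [(ih rest hr).1]
              simp [pvBMain_cons, h1, h2, h3]
              cases pvBMain rest <;> simp
      · intro chars g
        by_cases h1 : c = '\\'
        · subst h1
          match rest with
          | [] => simp [pvALoop, pvBGroup_cons]
          | nxt :: rest' =>
            have hr' : rest'.length ≤ n := by simp at hr; omega
            by_cases e1 : nxt = '\\'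
            · subst e1
              rw [show pvALoop ('\\' :: '\\' :: rest') chars false (some g)
                    = pvALoop rest' chars false (some (g ++ ['\\'])) by
                  simp [pvALoop, pvAppendA]]
              rw [(ih rest' hr').2]
              simp [pvBGroup_cons, pvEscOK]
            · by_cases e2 : nxt = '['
              · subst e2
                rw [show pvALoop ('\\' :: '[' :: rest') chars false (some g)
                      = pvALoop rest' chars false (some (g ++ ['['])) by
                    simp [pvALoop, pvAppendA]]
                rw [(ih rest' hr').2]
                simp [pvBGroup_cons, pvEscOK]
              · by_cases e3 : nxt = ']'
                · subst e3
                  rw [show pvALoop ('\\' :: ']' :: rest') chars false (some g)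
                        = pvALoop rest' chars false (some (g ++ [']'])) by
                      simp [pvALoop, pvAppendA]]
                  rw [(ih rest' hr').2]
                  simp [pvBGroup_cons, pvEscOK]
                · simp [pvALoop, pvBGroup_cons, pvEscOK, e1, e2, e3]
        · by_cases h2 : c = '['
          · subst h2; simp [pvALoop, pvBGroup_cons]
          · by_cases h3 : c = ']'
            · subst h3
              by_cases hg : g = []
              · subst hg; simp [pvALoop, pvBGroup_cons]
              · rw [show pvALoop (']' :: rest) chars false (some g)
                      = pvALoop rest (chars ++ [String.mk g]) false none by
                    simp [pvALoop, hg]]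
                rw [(ih rest hr).1]
                simp [pvBGroup_cons, hg]
                cases pvBMain rest <;> simp
            · rw [show pvALoop (c :: rest) chars false (some g)
                    = pvALoop rest chars false (some (g ++ [c])) by
                  simp [pvALoop, pvAppendA, h1, h2, h3]]
              rw [(ih rest hr).2]
              simp [pvBGroup_cons, h1, h2, h3]

theorem parse_text_into_characters_spec : Claim_equal_parse_text_into_characters := by
  intro text _ _
  unfold Spec_parse_text_into_characters parse_text_into_characters parse_text_into_characters_alt
  rw [(pvKey text.toList.length text.toList le_rfl).1 []]
  cases pvBMain text.toList <;> simp
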